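-- pv_equiv track=rewrite | github.com/antonio-caceres/nonogram | src/nonogram/gram.py | _init_clue
-- ===== SOURCE A (Python) =====
-- def _init_clue(stack):
--     """Initialize a clue with a stack (LIFO).
--
--     This implementation recurses on iterables in *args that contain iterables,
--     but the user shouldn't assume that functionality.
--     """
--     clue = []
--
--     while stack:
--         itm = stack.pop()
--         try:
--             # test for integer conversion before iteration because of strings
--             num = int(itm)
--             if num < 0:
--                 raise ValueError("Negative numbers are not valid clues.")
--             if num > 0:  # 0 is a valid clue that is equivalent to an empty clue, so ignore.
--                 clue.append(num)
--         except TypeError: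
--             stack += reversed(itm)  # handle lists from low-index to high-index
--
--     return clue
-- ===== SOURCE B (Python) =====
-- def _init_clue(stack):
--     """Initialize a clue with a stack (LIFO).
--
--     Simpler one-pass version: validate, then keep the positive entries in
--     pop (reverse) order.  Like the original, it leaves the stack empty.
--     """
--     if any(n < 0 for n in stack):
--         raise ValueError("Negative numbers are not valid clues.")
--     clue = [n for n in reversed(stack) if n > 0]
--     stack.clear()
--     return clue
-- ===== Notes on version B (the rewrite author's own statement) =====
-- stated objective: simpler
-- what changed: Replaces the mutating while/pop loop with a validation pass plus a single reversed-filter comprehension (for the int-list domain of the port; nested-iterable recursion is outside it). A single list comprehension avoids per-element pop() mutation and try/except overhead.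
import Mathlib
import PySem

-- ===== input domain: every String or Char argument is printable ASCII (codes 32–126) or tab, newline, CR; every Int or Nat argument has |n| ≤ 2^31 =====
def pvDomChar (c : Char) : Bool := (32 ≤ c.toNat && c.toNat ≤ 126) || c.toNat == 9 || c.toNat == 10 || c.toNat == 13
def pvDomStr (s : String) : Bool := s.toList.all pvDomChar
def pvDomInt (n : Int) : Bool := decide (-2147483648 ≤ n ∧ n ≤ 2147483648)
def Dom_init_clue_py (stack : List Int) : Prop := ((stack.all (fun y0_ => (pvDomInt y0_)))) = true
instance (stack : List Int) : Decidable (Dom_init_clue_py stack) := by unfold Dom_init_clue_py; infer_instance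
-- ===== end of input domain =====

-- B replaces A's mutating while/pop loop by one reversed-filter comprehension ('simpler').
-- Both A and B empty the stack argument in place; the equivalence proved is about the return value.

-- ===== PORT A =====
-- while stack: itm = stack.pop(); append positives to clue (the 'raise' branch is outside Pre_,
-- where the port's value is unconstrained; the TypeError/recursion branch never fires on ints).
def initClueLoop (s clue : List Int) : List Int :=
  if hne : s = [] then clue             -- stack empty: return clue
  else
    let itm := s.getLast hne            -- itm = stack.pop()
    initClueLoop s.dropLast
      (if itm < 0 then clue             -- Python: raise ValueError (excluded by Pre_)
       else if itm > 0 then clue ++ [itm]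
       else clue)                       -- 0 is ignored
termination_by s.length
decreasing_by
  have := List.length_pos_of_ne_nil hne
  simp [List.length_dropLast]; omega

def init_clue_py (stack : List Int) : List Int := initClueLoop stack []

-- ===== PORT B =====
-- if any negative: raise (outside Pre_); else [n for n in reversed(stack) if n > 0]
def init_clue_py_alt (stack : List Int) : List Int :=
  stack.reverse.filter (fun n => 0 < n)

-- ===== PRECONDITION & SPEC =====
-- Pre_ excludes stacks containing a negative number, on which the Python A raises ValueError.
def Pre_init_clue_py (stack : List Int) : Prop := ∀ n ∈ stack, 0 ≤ n
instance (stack : List Int) : Decidable (Pre_init_clue_py stack) := by unfold Pre_init_clue_py; infer_instance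
def pvWitness_init_clue_py : List Int := [3, 0, 7, 2]
def Spec_init_clue_py (stack : List Int) (out : List Int) : Prop := out = init_clue_py_alt stack
instance (stack : List Int) (out : List Int) : Decidable (Spec_init_clue_py stack out) := by unfold Spec_init_clue_py; infer_instance

-- ===== CLAIM (what is proved, stated in full; the proofs are below) =====
def Claim_equal_init_clue_py : Prop := ∀ (stack : List Int), Dom_init_clue_py stack → Pre_init_clue_py stack → Spec_init_clue_py stack (init_clue_py stack)

-- ===== LEMMAS AND PROOFS =====
-- Loop invariant: on a nonnegative stack, the loop appends the positive entries in pop order.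
theorem initClueLoop_spec (s : List Int) (hs : ∀ n ∈ s, 0 ≤ n) (clue : List Int) :
    initClueLoop s clue = clue ++ s.reverse.filter (fun n => 0 < n) := by
  induction s using List.reverseRecOn generalizing clue with
  | nil => simp [initClueLoop]
  | append_singleton t a ih =>
      have ha : 0 ≤ a := hs a (by simp)
      have ht : ∀ n ∈ t, 0 ≤ n := fun n hn => hs n (by simp [hn])
      have hne : t ++ [a] ≠ [] := by simp
      rw [initClueLoop]
      simp only [hne, dite_false, List.getLast_concat, List.dropLast_concat]
      rw [ih ht]
      by_cases hpos : 0 < a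
      · have : ¬ a < 0 := by omega
        simp [this, hpos]
      · have h0 : a = 0 := by omega
        simp [h0]

-- ===== VERDICT (by name: the statement is the Claim_ definition above) =====
theorem init_clue_py_spec : Claim_equal_init_clue_py := by
  intro stack _ hpre
  unfold Spec_init_clue_py init_clue_py init_clue_py_alt
  simpa using initClueLoop_spec stack hpre []
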